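-- pv_equiv track=rewrite | github.com/ChangeCapsInRS/Data-Augmentation-in-RSICC | src/augmentation_methods.py | augment_text_rotate_180
-- ===== SOURCE A (Python) =====
-- from typing import Callable, List, Literal, Optional, Sequence, Tuple
--
-- BOTTOM_DIRECTIONS = (
--     "bottom",
--     "lower",
--     "below",
--     "bottommost",
--     "lowest",
-- )
--
-- TOP_DIRECTIONS = (
--     "top",
--     "upper",
--     "above",
--     "topmost",
--     "highest",
--     "higher",
-- )
--
-- def augment_text_rotate_180(raw_sentences: Sequence[str]):
--     right_direction = "right"
--     left_direction = "left"
--     bottom_directions = BOTTOM_DIRECTIONS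
--     top_directions = TOP_DIRECTIONS
--     new_sentences = []
--     for sent in raw_sentences:
--         words = sent.split(" ")
--         k = 0
--         while k < len(words):
--             if (
--                 k + 1 < len(words)
--                 and words[k] in bottom_directions
--                 and words[k + 1] == left_direction
--             ):
--                 words[k], words[k + 1] = top_directions[0], right_direction
--                 k += 1
--             elif (
--                 k + 1 < len(words)
--                 and words[k] in top_directions
--                 and words[k + 1] == right_direction
--             ):
--                 words[k], words[k + 1] = bottom_directions[0], left_direction
--                 k += 1
--             elif (
--                 k + 1 < len(words)
--                 and words[k] in top_directions
--                 and words[k + 1] == left_direction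
--             ):
--                 words[k], words[k + 1] = bottom_directions[0], right_direction
--                 k += 1
--             elif (
--                 k + 1 < len(words)
--                 and words[k] in bottom_directions
--                 and words[k + 1] == right_direction
--             ):
--                 words[k], words[k + 1] = top_directions[0], left_direction
--                 k += 1
--             elif words[k] == right_direction:
--                 words[k] = left_direction
--             elif words[k] in bottom_directions:
--                 words[k] = top_directions[0]
--             elif words[k] == left_direction:
--                 words[k] = right_direction
--             elif words[k] in top_directions:
--                 words[k] = bottom_directions[0]
--             k += 1
--         new_sentences.append(" ".join(words))
--
--     return new_sentences
-- ===== SOURCE B (Python) =====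
-- BOTTOM_DIRECTIONS = (
--     "bottom",
--     "lower",
--     "below",
--     "bottommost",
--     "lowest",
-- )
--
-- TOP_DIRECTIONS = (
--     "top",
--     "upper",
--     "above",
--     "topmost",
--     "highest",
--     "higher",
-- )
--
-- def augment_text_rotate_180(raw_sentences):
--     # Each pair case of the original is just the single-word rule applied to
--     # both words, so a one-pass per-word dictionary substitution suffices.
--     mapping = {"right": "left", "left": "right"}
--     for w in BOTTOM_DIRECTIONS:
--         mapping[w] = TOP_DIRECTIONS[0]
--     for w in TOP_DIRECTIONS:
--         mapping[w] = BOTTOM_DIRECTIONS[0]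
--     return [" ".join(mapping.get(w, w) for w in sent.split(" "))
--             for sent in raw_sentences]
-- ===== Notes on version B (the rewrite author's own statement) =====
-- stated objective: simpler
-- what changed: A's while-loop with pairwise lookahead (four two-word cases plus index arithmetic) is replaced by a single word->word dictionary built once, since each pair case equals the single-word rule applied to both words; B is one map over the words per sentence.
import Mathlib
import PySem

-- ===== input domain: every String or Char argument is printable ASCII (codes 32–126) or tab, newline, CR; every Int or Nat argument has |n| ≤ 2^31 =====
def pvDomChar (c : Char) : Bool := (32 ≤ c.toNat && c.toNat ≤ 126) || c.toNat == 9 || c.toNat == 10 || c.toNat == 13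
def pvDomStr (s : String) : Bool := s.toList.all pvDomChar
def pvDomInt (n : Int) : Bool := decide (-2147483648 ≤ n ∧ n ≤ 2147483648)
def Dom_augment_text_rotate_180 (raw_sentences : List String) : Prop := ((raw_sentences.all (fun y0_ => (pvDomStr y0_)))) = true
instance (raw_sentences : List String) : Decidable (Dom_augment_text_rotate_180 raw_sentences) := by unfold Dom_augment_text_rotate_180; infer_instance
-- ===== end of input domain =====

-- B replaces A's while-loop with pairwise lookahead by a single per-word dictionary
-- substitution (each pair case equals the single-word rule applied to both words): simpler.

-- ===== PORT A =====
def pvBottomDirs : List String := ["bottom", "lower", "below", "bottommost", "lowest"]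
def pvTopDirs : List String := ["top", "upper", "above", "topmost", "highest", "higher"]

-- the elif chain on a single word (the tail of A's while-body)
def pvSingleA (w : String) : String :=
  if w == "right" then "left"
  else if pvBottomDirs.contains w then "top"
  else if w == "left" then "right"
  else if pvTopDirs.contains w then "bottom"
  else w

-- A's while loop over the word list: pair cases advance by 2, otherwise by 1
def pvLoopA : List String → List String
  | [] => []
  | [w] => [pvSingleA w]
  | w :: w2 :: rest =>
    if pvBottomDirs.contains w && w2 == "left" then
      "top" :: "right" :: pvLoopA rest
    else if pvTopDirs.contains w && w2 == "right" then
      "bottom" :: "left" :: pvLoopA rest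
    else if pvTopDirs.contains w && w2 == "left" then
      "bottom" :: "right" :: pvLoopA rest
    else if pvBottomDirs.contains w && w2 == "right" then
      "top" :: "left" :: pvLoopA rest
    else
      pvSingleA w :: pvLoopA (w2 :: rest)

-- sent.split(" "): the separator " " is nonempty, so split? is never none
def augment_text_rotate_180 (raw_sentences : List String) : List String :=
  raw_sentences.foldl
    (fun new_sentences sent =>
      new_sentences ++ [PySem.Str.join " " (pvLoopA ((PySem.Str.split? sent " ").getD []))])
    []

-- ===== PORT B =====
-- mapping = {"right":"left","left":"right"}; then the two for-loops over the direction tuples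
def pvRotMap : PySem.Dict String String :=
  let m := (PySem.Dict.empty.insert "right" "left").insert "left" "right"
  let m := pvBottomDirs.foldl (fun d w => d.insert w "top") m
  pvTopDirs.foldl (fun d w => d.insert w "bottom") m

def augment_text_rotate_180_alt (raw_sentences : List String) : List String :=
  raw_sentences.map (fun sent =>
    PySem.Str.join " "
      (((PySem.Str.split? sent " ").getD []).map (fun w => pvRotMap.getD w w)))

-- ===== PRECONDITION & SPEC =====
def Spec_augment_text_rotate_180 (raw_sentences : List String) (out : List String) : Prop := out = augment_text_rotate_180_alt raw_sentences
instance (raw_sentences : List String) (out : List String) : Decidable (Spec_augment_text_rotate_180 raw_sentences out) := by unfold Spec_augment_text_rotate_180; infer_instance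

-- ===== CLAIM (what is proved, stated in full; the proofs are below) =====
def Claim_equal_augment_text_rotate_180 : Prop := ∀ (raw_sentences : List String), Dom_augment_text_rotate_180 raw_sentences → Spec_augment_text_rotate_180 raw_sentences (augment_text_rotate_180 raw_sentences)

-- ===== LEMMAS AND PROOFS =====

-- B's dictionary lookup agrees with A's single-word elif chain
theorem pvRotMap_getD_eq (w : String) : pvRotMap.getD w w = pvSingleA w := by
  have h : pvRotMap = PySem.Dict.mk [("right","left"),("left","right"),("bottom","top"),
      ("lower","top"),("below","top"),("bottommost","top"),("lowest","top"),("top","bottom"),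
      ("upper","bottom"),("above","bottom"),("topmost","bottom"),("highest","bottom"),
      ("higher","bottom")] := by decide
  by_cases hw : w ∈ (["right","left","bottom","lower","below","bottommost","lowest","top",
      "upper","above","topmost","highest","higher"] : List String)
  · fin_cases hw <;> decide
  · simp only [List.mem_cons, List.not_mem_nil, or_false, not_or] at hw
    obtain ⟨h1,h2,h3,h4,h5,h6,h7,h8,h9,h10,h11,h12,h13⟩ := hw
    simp [h, PySem.Dict.getD, pvSingleA, pvBottomDirs, pvTopDirs,
      Ne.symm h1, Ne.symm h2, Ne.symm h3, Ne.symm h4, Ne.symm h5, Ne.symm h6, Ne.symm h7,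
      Ne.symm h8, Ne.symm h9, Ne.symm h10, Ne.symm h11, Ne.symm h12, Ne.symm h13,
      h1, h2, h3, h4, h5, h6, h7, h8, h9, h10, h11, h12, h13, PySem.Dict.get?]

theorem pvSingleA_bottom {w : String} (h : pvBottomDirs.contains w = true) :
    pvSingleA w = "top" := by
  simp only [pvBottomDirs, List.contains_cons, List.contains_nil, Bool.or_eq_true,
    beq_iff_eq] at h
  rcases h with h|h|h|h|h|h <;> first | subst h; decide | simp at h

theorem pvSingleA_top {w : String} (h : pvTopDirs.contains w = true) :
    pvSingleA w = "bottom" := by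
  simp only [pvTopDirs, List.contains_cons, List.contains_nil, Bool.or_eq_true,
    beq_iff_eq] at h
  rcases h with h|h|h|h|h|h|h <;> first | subst h; decide | simp at h

-- A's lookahead loop is exactly the per-word map
theorem pvLoopA_eq_map (ws : List String) : pvLoopA ws = ws.map pvSingleA := by
  fun_induction pvLoopA ws with
  | case1 => rfl
  | case2 w => rfl
  | case3 w w2 rest h ih =>
    simp only [Bool.and_eq_true, beq_iff_eq] at h
    obtain ⟨hb, hl⟩ := h; subst hl
    simp [ih, pvSingleA_bottom hb]; decide
  | case4 w w2 rest _ h ih =>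
    simp only [Bool.and_eq_true, beq_iff_eq] at h
    obtain ⟨hb, hl⟩ := h; subst hl
    simp [ih, pvSingleA_top hb]; decide
  | case5 w w2 rest _ _ h ih =>
    simp only [Bool.and_eq_true, beq_iff_eq] at h
    obtain ⟨hb, hl⟩ := h; subst hl
    simp [ih, pvSingleA_top hb]; decide
  | case6 w w2 rest _ _ _ h ih =>
    simp only [Bool.and_eq_true, beq_iff_eq] at h
    obtain ⟨hb, hl⟩ := h; subst hl
    simp [ih, pvSingleA_bottom hb]; decide
  | case7 w w2 rest _ _ _ _ ih =>
    simp [ih]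

-- ===== VERDICT (by name: the statement is the Claim_ definition above) =====
theorem augment_text_rotate_180_spec : Claim_equal_augment_text_rotate_180 := by
  intro raw _
  unfold Spec_augment_text_rotate_180 augment_text_rotate_180 augment_text_rotate_180_alt
  rw [PySem.List.foldl_append_singleton_eq_map]
  refine List.map_congr_left (fun sent _ => ?_)
  rw [pvLoopA_eq_map]
  exact congrArg _ (List.map_congr_left (fun w _ => (pvRotMap_getD_eq w).symm))
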